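-- pv_equiv track=rewrite | github.com/su-ram/Problem-Solving | 프로그래머스/토스_Q2.py | solution
-- ===== SOURCE A (Python) =====
-- def solution(servers, sticky, requests):
--     answer = [[] for _ in range(servers)]
--     if not sticky:
--         for i in range(len(requests)):
--             answer[i % servers].append(requests[i])
--     else:
--         head = 0
--         counter = {}
--         for i in range(len(requests)):
--             head = head % servers
--             request = requests[i]
--             if counter.get(request) is None:
--                 answer[head].append(request)
--                 counter[request] = head
--                 head += 1
--             else:
--                 answer[counter.get(request)].append(request)
--     return answer
-- ===== SOURCE B (Python) =====
-- def solution(servers, sticky, requests):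
--     # Bucket-major construction: each server's list is computed independently
--     # by filtering the request stream, instead of dispatching requests one by
--     # one into buckets.
--     if sticky:
--         rank = {}
--         for r in requests:
--             if r not in rank:
--                 rank[r] = len(rank)
--         return [[r for r in requests if rank[r] % servers == k]
--                 for k in range(servers)]
--     return [[r for i, r in enumerate(requests) if i % servers == k]
--             for k in range(servers)]
-- ===== Notes on version B (the rewrite author's own statement) =====
-- stated objective: alternative
-- what changed: A dispatches requests one by one into buckets in a single request-major pass with head/counter bookkeeping; B builds the answer bucket-major: each server's list is produced independently by filtering the whole request stream (sticky: by first-occurrence rank mod servers; non-sticky: by position mod servers).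
import Mathlib
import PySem

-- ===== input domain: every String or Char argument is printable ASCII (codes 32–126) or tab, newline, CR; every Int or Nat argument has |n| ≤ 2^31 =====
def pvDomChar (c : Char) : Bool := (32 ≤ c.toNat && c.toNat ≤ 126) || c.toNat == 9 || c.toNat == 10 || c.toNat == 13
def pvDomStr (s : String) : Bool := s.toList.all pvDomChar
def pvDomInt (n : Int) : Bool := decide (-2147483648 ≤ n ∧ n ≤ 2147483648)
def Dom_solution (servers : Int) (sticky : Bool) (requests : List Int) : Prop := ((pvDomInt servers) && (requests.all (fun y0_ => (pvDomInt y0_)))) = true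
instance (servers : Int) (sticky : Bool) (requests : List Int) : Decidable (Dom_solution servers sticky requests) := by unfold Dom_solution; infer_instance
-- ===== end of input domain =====

-- B replaces A's single request-major dispatch loop (head/counter bookkeeping while
-- appending) by a bucket-major construction: each server's list is an independent
-- filter of the request stream; alternative decomposition, not claimed faster.


-- ===== PORT A =====
-- answer[i].append(v); exact for 0 ≤ i < answer.length, which Pre_solution guarantees
-- (Python raises IndexError outside that range, excluded by Pre_solution).
def pyAppendAt (ans : List (List Int)) (i : Int) (v : Int) : List (List Int) :=
  ans.modify i.toNat (· ++ [v])

def solution (servers : Int) (sticky : Bool) (requests : List Int) : List (List Int) :=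
  let answer : List (List Int) := List.replicate servers.toNat []
  if !sticky then
    (PySem.List.pyRange 0 requests.length 1).foldl
      (fun ans i => pyAppendAt ans (PySem.Int.mod i servers) (PySem.List.pyGetD requests i 0))
      answer
  else
    -- state = (answer, head, counter)
    ((PySem.List.pyRange 0 requests.length 1).foldl
      (fun (st : List (List Int) × Int × PySem.Dict Int Int) i =>
        let head := PySem.Int.mod st.2.1 servers
        let request := PySem.List.pyGetD requests i 0
        match st.2.2.get? request with
        | none => (pyAppendAt st.1 head request, head + 1, st.2.2.insert request head)
        | some j => (pyAppendAt st.1 j request, head, st.2.2))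
      (answer, 0, PySem.Dict.empty)).1

-- ===== PORT B =====
def solution_alt (servers : Int) (sticky : Bool) (requests : List Int) : List (List Int) :=
  if sticky then
    let rank : PySem.Dict Int Int := requests.foldl
      (fun d r => if d.contains r then d else d.insert r (d.size : Int)) PySem.Dict.empty
    -- 'rank[r]' in the comprehension always hits (every request is a key); ported as getD
    (PySem.List.pyRange 0 servers 1).map (fun k =>
      requests.filter (fun r => PySem.Int.mod (rank.getD r 0) servers == k))
  else
    (PySem.List.pyRange 0 servers 1).map (fun k =>
      ((PySem.List.enumerate requests 0).filter
        (fun p => PySem.Int.mod p.1 servers == k)).map (fun p => p.2))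

-- ===== PRECONDITION & SPEC =====
-- Pre_ excludes exactly the inputs on which A raises: servers ≤ 0 with a non-empty
-- request list (ZeroDivisionError for servers = 0, IndexError for servers < 0).
def Pre_solution (servers : Int) (sticky : Bool) (requests : List Int) : Prop :=
  0 < servers ∨ requests = []
instance (servers : Int) (sticky : Bool) (requests : List Int) : Decidable (Pre_solution servers sticky requests) := by unfold Pre_solution; infer_instance

def pvWitness_solution : Int × Bool × List Int := (3, true, [10, 20, 10, 30, 20, 40])

def Spec_solution (servers : Int) (sticky : Bool) (requests : List Int) (out : List (List Int)) : Prop := out = solution_alt servers sticky requests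
instance (servers : Int) (sticky : Bool) (requests : List Int) (out : List (List Int)) : Decidable (Spec_solution servers sticky requests out) := by unfold Spec_solution; infer_instance

-- ===== CLAIM (what is proved, stated in full; the proofs are below) =====
def Claim_equal_solution : Prop := ∀ (servers : Int) (sticky : Bool) (requests : List Int), Dom_solution servers sticky requests → Pre_solution servers sticky requests → Spec_solution servers sticky requests (solution servers sticky requests)
-- ===== LEMMAS AND PROOFS =====
-- A's sticky loop body over the request values
def stA (s : Int) (st : List (List Int) × Int × PySem.Dict Int Int) (r : Int) :
    List (List Int) × Int × PySem.Dict Int Int :=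
  let head := PySem.Int.mod st.2.1 s
  match st.2.2.get? r with
  | none => (pyAppendAt st.1 head r, head + 1, st.2.2.insert r head)
  | some j => (pyAppendAt st.1 j r, head, st.2.2)

-- B's rank-building loop body
def stR (d : PySem.Dict Int Int) (r : Int) : PySem.Dict Int Int :=
  if d.contains r then d else d.insert r (d.size : Int)

theorem sol_sticky (s : Int) (requests : List Int) :
    solution s true requests = (requests.foldl (stA s) (List.replicate s.toNat [], 0, PySem.Dict.empty)).1 := by
  simp only [solution, Bool.not_true, Bool.false_eq_true, if_false]
  rw [PySem.List.foldl_pyRange_zero_pyGetD' requests 0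
    (fun (st : List (List Int) × Int × PySem.Dict Int Int) r =>
      match st.2.2.get? r with
      | none => (pyAppendAt st.1 (PySem.Int.mod st.2.1 s) r, PySem.Int.mod st.2.1 s + 1,
          st.2.2.insert r (PySem.Int.mod st.2.1 s))
      | some j => (pyAppendAt st.1 j r, PySem.Int.mod st.2.1 s, st.2.2))]
  rfl

theorem sol_nonsticky (s : Int) (requests : List Int) :
    solution s false requests =
      (PySem.List.enumerate requests 0).foldl
        (fun a p => pyAppendAt a (PySem.Int.mod p.1 s) p.2) (List.replicate s.toNat []) := by
  simp only [solution, Bool.not_false, if_true]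
  rw [PySem.List.enumerate_eq_map_pyRange requests 0, List.foldl_map]
  rfl

theorem mod_mod (s a : Int) (hs : 0 < s) :
    PySem.Int.mod (PySem.Int.mod a s) s = PySem.Int.mod a s := by
  have h1 := PySem.Int.mod_nonneg a hs
  have h2 := PySem.Int.mod_lt a hs
  rw [PySem.Int.mod_eq_emod_of_pos hs, Int.emod_eq_of_lt h1 h2]

theorem mod_succ (s a : Int) (hs : 0 < s) :
    PySem.Int.mod (PySem.Int.mod a s + 1) s = PySem.Int.mod (a + 1) s := by
  rw [PySem.Int.mod_eq_emod_of_pos hs, PySem.Int.mod_eq_emod_of_pos hs,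
      PySem.Int.mod_eq_emod_of_pos hs]
  have h : a % s + 1 = (a + 1) + s * (-(a / s)) := by rw [Int.emod_def]; ring
  rw [h, Int.add_mul_emod_self_left]

theorem preserveR (rest : List Int) : ∀ (d : PySem.Dict Int Int) (r v : Int),
    d.get? r = some v → (rest.foldl stR d).get? r = some v := by
  induction rest with
  | nil => intro d r v hv; simpa using hv
  | cons x rest ih =>
    intro d r v hv
    by_cases h : d.contains x
    · simpa [stR, h] using ih d r v hv
    · simp only [List.foldl_cons, stR, h, if_false, Bool.false_eq_true]
      apply ih
      rw [PySem.Dict.get?_insert_of_ne]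
      · exact hv
      · intro he; subst he
        rw [PySem.Dict.contains_eq_isSome_get?, hv] at h; simp at h

-- A's interleaved fold equals a uniform dispatch by the final rank dict (mod s)
theorem main_sticky (s : Int) (hs : 0 < s) (rest : List Int) :
    ∀ (ans : List (List Int)) (c d : PySem.Dict Int Int) (head : Int),
    (∀ r, c.get? r = (d.get? r).map (fun v => PySem.Int.mod v s)) →
    PySem.Int.mod head s = PySem.Int.mod (d.size : Int) s →
    (rest.foldl (stA s) (ans, head, c)).1
      = rest.foldl (fun a r => pyAppendAt a (PySem.Int.mod ((rest.foldl stR d).getD r 0) s) r) ans := by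
  induction rest with
  | nil => intro ans c d head _ _; rfl
  | cons x rest ih =>
    intro ans c d head hrel hmod
    simp only [List.foldl_cons]
    cases hx : c.get? x with
    | some j =>
      obtain ⟨v, hdv, hjv⟩ : ∃ v, d.get? x = some v ∧ j = PySem.Int.mod v s := by
        have := hrel x; rw [hx] at this
        cases hd : d.get? x with
        | none => rw [hd] at this; simp at this
        | some v => rw [hd] at this; simp at this; exact ⟨v, rfl, this⟩
      have hc : d.contains x = true := by
        rw [PySem.Dict.contains_eq_isSome_get?, hdv]; rfl
      have hD : ((rest.foldl stR d).getD x 0) = v :=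
        PySem.Dict.getD_of_get?_eq_some _ 0 (preserveR rest d x v hdv)
      simp only [stA, stR, hx, hc, if_true]
      rw [hD, ← hjv]
      exact ih _ c d (PySem.Int.mod head s) hrel (by rw [mod_mod s head hs, hmod])
    | none =>
      have hdx : d.get? x = none := by
        have := hrel x; rw [hx] at this
        cases hd : d.get? x with
        | none => rfl
        | some v => rw [hd] at this; simp at this
      have hc : d.contains x = false := by
        rw [PySem.Dict.contains_eq_isSome_get?, hdx]; rfl
      simp only [stA, stR, hx, hc, if_false, Bool.false_eq_true]
      have hD : ((rest.foldl stR (d.insert x (d.size : Int))).getD x 0) = (d.size : Int) :=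
        PySem.Dict.getD_of_get?_eq_some _ 0
          (preserveR rest _ x _ (PySem.Dict.get?_insert_self _ _ _))
      have hrel' : ∀ r, (c.insert x (PySem.Int.mod head s)).get? r
          = ((d.insert x (d.size : Int)).get? r).map (fun v => PySem.Int.mod v s) := by
        intro r
        by_cases hr : r = x
        · subst hr
          rw [PySem.Dict.get?_insert_self, PySem.Dict.get?_insert_self]
          simp [hmod]
        · rw [PySem.Dict.get?_insert_of_ne _ _ hr, PySem.Dict.get?_insert_of_ne _ _ hr, hrel r]
      have hsize : ((d.insert x (d.size : Int)).size : Int) = (d.size : Int) + 1 := by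
        rw [PySem.Dict.size_insert, hc]
        simp
      have hmod' : PySem.Int.mod (PySem.Int.mod head s + 1) s
          = PySem.Int.mod (((d.insert x (d.size : Int)).size : Int)) s := by
        rw [hsize, hmod, mod_succ s _ hs]
      rw [hD]
      rw [hmod] at hrel' hmod' ⊢
      exact ih _ _ _ _ hrel' hmod'

theorem pyAppendAt_map_range (n : Nat) (g : Nat → List Int) (i v : Int) :
    pyAppendAt ((List.range n).map g) i v
      = (List.range n).map (fun k => if k = i.toNat then g k ++ [v] else g k) := by
  apply List.ext_getElem
  · simp [pyAppendAt]
  · intro j h1 h2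
    simp only [pyAppendAt, List.getElem_modify, List.getElem_map, List.getElem_range]
    by_cases hj : i.toNat = j
    · simp [hj]
    · simp [hj, Ne.symm hj]

-- grouping lemma: dispatching each x into bucket (idx x) = per-bucket filtering
theorem bucket {α : Type} (idx : α → Int) (val : α → Int) (n : Nat) (xs : List α) :
    ∀ (g : Nat → List Int), (∀ a ∈ xs, 0 ≤ idx a ∧ idx a < (n : Int)) →
    xs.foldl (fun ans x => pyAppendAt ans (idx x) (val x)) ((List.range n).map g)
      = (List.range n).map (fun k => g k ++ (xs.filter (fun x => idx x == (k : Int))).map val) := by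
  induction xs with
  | nil => intro g _; simp
  | cons x xs ih =>
    intro g hb
    have hx := hb x (List.mem_cons_self)
    simp only [List.foldl_cons]
    rw [pyAppendAt_map_range n g (idx x) (val x),
        ih _ (fun a ha => hb a (List.mem_cons_of_mem _ ha))]
    apply List.map_congr_left
    intro k hk
    by_cases hkx : (k : Int) = idx x
    · have hk' : k = (idx x).toNat := by omega
      have hb : (idx x == (k : Int)) = true := by simpa using hkx.symm
      rw [if_pos hk', List.filter_cons, hb, if_pos rfl, List.map_cons, List.append_assoc,
        List.singleton_append]
    · have hne : ¬ (k = (idx x).toNat) := by omega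
      have hb : (idx x == (k : Int)) = false := by
        simp only [beq_eq_false_iff_ne, ne_eq]
        intro he; exact hkx he.symm
      simp [hne, hb]

theorem replicate_eq_map_range (n : Nat) :
    (List.replicate n ([] : List Int)) = (List.range n).map (fun _ => []) := by
  simp

theorem final_sticky (s : Int) (hs : 0 < s) (requests : List Int) :
    solution s true requests = solution_alt s true requests := by
  have hfold : requests.foldl
      (fun d r => if d.contains r then d else d.insert r (d.size : Int)) PySem.Dict.empty
      = requests.foldl stR PySem.Dict.empty := rfl
  rw [sol_sticky, solution_alt]
  simp only [if_pos]
  rw [hfold,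
    main_sticky s hs requests _ PySem.Dict.empty PySem.Dict.empty 0
      (by intro r; simp [PySem.Dict.get?_empty]) (by simp [PySem.Dict.size_empty]),
    replicate_eq_map_range,
    bucket (fun r => PySem.Int.mod ((requests.foldl stR PySem.Dict.empty).getD r 0) s) (fun r => r)
      s.toNat requests (fun _ => [])
      (by
        intro a _
        refine ⟨PySem.Int.mod_nonneg _ hs, ?_⟩
        rw [Int.toNat_of_nonneg (le_of_lt hs)]
        exact PySem.Int.mod_lt _ hs),
    PySem.List.pyRange_one, List.map_map]
  simp only [Int.sub_zero]
  apply List.map_congr_left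
  intro k hk
  simp

theorem final_nonsticky (s : Int) (hs : 0 < s) (requests : List Int) :
    solution s false requests = solution_alt s false requests := by
  rw [sol_nonsticky, solution_alt]
  simp only [Bool.false_eq_true, if_false]
  rw [replicate_eq_map_range,
    bucket (fun p : Int × Int => PySem.Int.mod p.1 s) (fun p => p.2)
      s.toNat (PySem.List.enumerate requests 0) (fun _ => [])
      (by
        intro a _
        refine ⟨PySem.Int.mod_nonneg _ hs, ?_⟩
        rw [Int.toNat_of_nonneg (le_of_lt hs)]
        exact PySem.Int.mod_lt _ hs),
    PySem.List.pyRange_one, List.map_map]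
  simp only [Int.sub_zero]
  apply List.map_congr_left
  intro k hk
  simp

theorem final_degenerate (s : Int) (hs : ¬ 0 < s) (sticky : Bool) :
    solution s sticky [] = solution_alt s sticky [] := by
  have h1 : s.toNat = 0 := by omega
  have h2 : PySem.List.pyRange 0 s 1 = [] := PySem.List.pyRange_one_eq_nil (by omega)
  cases sticky <;>
    simp [solution, solution_alt, h1, h2, PySem.List.enumerate, PySem.List.pyRange_one_eq_nil]

-- ===== VERDICT (by name: the statement is the Claim_ definition above) =====
theorem solution_spec : Claim_equal_solution := by
  intro s sticky requests _ hpre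
  unfold Spec_solution
  by_cases hs : 0 < s
  · cases sticky with
    | false => exact final_nonsticky s hs requests
    | true => exact final_sticky s hs requests
  · rcases hpre with h | h
    · exact absurd h hs
    · subst h; exact final_degenerate s hs sticky
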